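-- pv_equiv track=rewrite | github.com/glebvi1/YandexSudoku | ui/CellWidget.py | __variants_to_string
-- ===== SOURCE A (Python) =====
-- def __variants_to_string(variants: tuple) -> str:
--     """
--     :param variants: кортеж из int-ов
--     """
--     result = ""
--     index = 0
--     for elem in variants:
--         if index % 3 == 0 and index != 0:
--             result += "\n"
--         else:
--             result += " "
--         result += str(elem)
--         index += 1
--
--     return result
-- ===== SOURCE B (Python) =====
-- def __variants_to_string(variants: tuple) -> str:
--     if not variants:
--         return ""
--     lines = [" ".join(str(e) for e in variants[i:i + 3])
--              for i in range(0, len(variants), 3)]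
--     return " " + "\n".join(lines)
-- ===== Notes on version B (the rewrite author's own statement) =====
-- stated objective: alternative
-- what changed: A walks the tuple once keeping a modulo-3 index counter and appending a separator per element; B has no counter: it slices the tuple into groups of three via range(0, len, 3), space-joins each group into a line, and newline-joins the lines behind the single leading space A's first iteration emits.
import Mathlib
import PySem

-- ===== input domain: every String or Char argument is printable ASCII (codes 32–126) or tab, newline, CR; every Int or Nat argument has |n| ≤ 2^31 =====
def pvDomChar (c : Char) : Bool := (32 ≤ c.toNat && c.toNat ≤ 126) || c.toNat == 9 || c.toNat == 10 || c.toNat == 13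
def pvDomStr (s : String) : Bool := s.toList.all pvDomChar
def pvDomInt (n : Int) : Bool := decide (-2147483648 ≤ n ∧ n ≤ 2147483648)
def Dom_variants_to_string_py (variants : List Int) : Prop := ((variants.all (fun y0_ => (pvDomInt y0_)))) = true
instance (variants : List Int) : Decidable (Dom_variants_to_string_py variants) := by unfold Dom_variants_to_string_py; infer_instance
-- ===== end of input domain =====

-- B groups the input into slices of three and joins them, instead of A's single pass
-- with a modulo counter; objective: simpler/alternative decomposition, same exact output.

-- ===== PORT A =====
-- one step of A's for-loop: state is (result chars, index)
def pvStepA (st : List Char × Int) (elem : Int) : List Char × Int :=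
  let r := if PySem.Int.mod st.2 3 = 0 ∧ st.2 ≠ 0 then st.1 ++ ['\n'] else st.1 ++ [' ']
  (r ++ PySem.Int.toChars elem, st.2 + 1)

def variants_to_string_py (variants : List Int) : String :=
  String.ofList (variants.foldl pvStepA ([], 0)).1

-- ===== PORT B =====
def variants_to_string_py_alt (variants : List Int) : String :=
  if variants.isEmpty then "" else
    let lines : List (List Char) :=
      (PySem.List.pyRange 0 (PySem.List.len variants) 3).map (fun i =>
        PySem.Chars.join [' ']
          ((PySem.List.slice variants (some i) (some (i + 3))).map PySem.Int.toChars))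
    String.ofList (' ' :: PySem.Chars.join ['\n'] lines)

-- ===== PRECONDITION & SPEC =====
def Spec_variants_to_string_py (variants : List Int) (out : String) : Prop := out = variants_to_string_py_alt variants
instance (variants : List Int) (out : String) : Decidable (Spec_variants_to_string_py variants out) := by unfold Spec_variants_to_string_py; infer_instance

-- ===== CLAIM (what is proved, stated in full; the proofs are below) =====
def Claim_equal_variants_to_string_py : Prop := ∀ (variants : List Int), Dom_variants_to_string_py variants → Spec_variants_to_string_py variants (variants_to_string_py variants)

-- ===== LEMMAS AND PROOFS =====

-- the lines of the output, as char lists: chunks of three, space-separated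
def pvLines : List Int → List (List Char)
  | [] => []
  | [a] => [PySem.Int.toChars a]
  | [a, b] => [PySem.Int.toChars a ++ [' '] ++ PySem.Int.toChars b]
  | a :: b :: c :: rest =>
      (PySem.Int.toChars a ++ [' '] ++ PySem.Int.toChars b ++ [' '] ++ PySem.Int.toChars c)
        :: pvLines rest

lemma pv_mod3 (m : Nat) : PySem.Int.mod (3 * ((m : Int) + 1)) 3 = 0 := by
  rw [PySem.Int.mod_eq_emod_of_pos (by norm_num)]; omega

lemma pv_mod3_one (i : Int) (h : PySem.Int.mod i 3 = 0) : PySem.Int.mod (i + 1) 3 ≠ 0 := by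
  rw [PySem.Int.mod_eq_emod_of_pos (by norm_num)] at *; omega

lemma pv_mod3_two (i : Int) (h : PySem.Int.mod i 3 = 0) : PySem.Int.mod (i + 1 + 1) 3 ≠ 0 := by
  rw [PySem.Int.mod_eq_emod_of_pos (by norm_num)] at *; omega

-- A's fold from a positive index that is a multiple of 3 prefixes every line with '\n'
lemma pvA_tail (l : List Int) : ∀ (acc : List Char) (m : Nat),
    (l.foldl pvStepA (acc, 3 * ((m : Int) + 1))).1
      = acc ++ (pvLines l).flatMap (fun s => '\n' :: s) := by
  induction l using pvLines.induct with
  | case1 => intro acc m; simp [pvLines]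
  | case2 a =>
      intro acc m
      simp [pvLines, pvStepA, List.foldl, (by positivity : (0:Int) < 3 * ((m:Int)+1)).ne']
  | case3 a b =>
      intro acc m
      simp [pvLines, pvStepA, List.foldl,
        (by positivity : (0:Int) < 3 * ((m:Int)+1)).ne']
  | case4 a b c rest ih =>
      intro acc m
      have h3 : (3 * ((m : Int) + 1)) + 1 + 1 + 1 = 3 * (((m + 1 : Nat) : Int) + 1) := by
        push_cast; ring
      simp only [List.foldl, pvStepA, pv_mod3 m, pv_mod3_one _ (pv_mod3 m),
        pv_mod3_two _ (pv_mod3 m), (by positivity : (0:Int) < 3 * ((m:Int)+1)).ne',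
        ne_eq, not_false_eq_true, and_true, if_true]
      rw [h3, ih]
      simp [pvLines]

-- A's whole fold: a leading space, then the lines joined with '\n'
lemma pvA_chars (l : List Int) (h : l ≠ []) :
    (l.foldl pvStepA ([], 0)).1 = ' ' :: PySem.Chars.join ['\n'] (pvLines l) := by
  have hjoin : ∀ (x : List Char) (xs : List (List Char)),
      PySem.Chars.join ['\n'] (x :: xs) = x ++ xs.flatMap (fun s => '\n' :: s) := by
    intro x xs
    induction xs generalizing x with
    | nil => simp [PySem.Chars.join_singleton]
    | cons y ys ih => rw [PySem.Chars.join_cons_cons, ih]; simp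
  match l with
  | [a] => simp [pvLines, pvStepA, List.foldl, PySem.Chars.join_singleton]
  | [a, b] => simp [pvLines, pvStepA, List.foldl, PySem.Chars.join_singleton]
  | a :: b :: c :: rest =>
      simp only [List.foldl, pvStepA,
        PySem.Int.mod_eq_emod_of_pos (by norm_num : (0:Int) < 3)]
      norm_num
      rw [show (3:Int) = 3 * (((0 : Nat) : Int) + 1) by norm_num, pvA_tail rest,
        show pvLines (a :: b :: c :: rest)
            = (PySem.Int.toChars a ++ [' '] ++ PySem.Int.toChars b ++ [' ']
                ++ PySem.Int.toChars c) :: pvLines rest from rfl, hjoin]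
      simp

-- B's range-of-slices from offset j yields exactly the lines of 'full.drop j'
lemma pvLines_take_drop (l : List Int) (h : l ≠ []) :
    pvLines l = PySem.Chars.join [' '] ((l.take 3).map PySem.Int.toChars) :: pvLines (l.drop 3) := by
  match l with
  | [a] => simp [pvLines, PySem.Chars.join_singleton]
  | [a, b] => simp [pvLines, PySem.Chars.join_cons_cons, PySem.Chars.join_singleton]
  | a :: b :: c :: rest =>
      simp [pvLines, PySem.Chars.join_cons_cons, PySem.Chars.join_singleton]

lemma pvRange3_cons (a b : Int) (h : a < b) :
    PySem.List.pyRange a b 3 = a :: PySem.List.pyRange (a + 3) b 3 := by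
  rw [PySem.List.pyRange_of_pos _ _ (by norm_num), PySem.List.pyRange_of_pos _ _ (by norm_num)]
  by_cases h2 : a + 3 < b
  · have hc : ((b - a + 3 - 1) / 3).toNat = ((b - (a + 3) + 3 - 1) / 3).toNat + 1 := by omega
    simp only [if_pos h, if_pos h2, hc, List.range_succ_eq_map, List.map_cons, List.map_map]
    refine List.cons_eq_cons.mpr ⟨by push_cast; ring, ?_⟩
    apply List.map_congr_left; intro k _
    simp only [Function.comp, Nat.succ_eq_add_one]; push_cast; ring
  · have hc : ((b - a + 3 - 1) / 3).toNat = 1 := by omega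
    simp [if_pos h, if_neg h2, hc, List.range_succ]

lemma pvB_lines (full : List Int) : ∀ (j : Nat),
    ((PySem.List.pyRange (j : Int) (full.length : Int) 3).map (fun i =>
        PySem.Chars.join [' ']
          ((PySem.List.slice full (some i) (some (i + 3))).map PySem.Int.toChars)))
      = pvLines (full.drop j) := by
  intro j
  by_cases hj : j < full.length
  · rw [pvRange3_cons _ _ (by exact_mod_cast hj)]
    have h3 : ((j : Int)) + 3 = (((j + 3 : Nat) : Int)) := by push_cast; ring
    have hs : PySem.List.slice full (some (j : Int)) (some ((j : Int) + 3))
        = (full.drop j).take 3 := by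
      have := PySem.List.slice_natCast_add full j 3
      simpa using this
    rw [List.map_cons, hs, h3, pvB_lines full (j + 3),
      pvLines_take_drop (full.drop j) (by simp [List.drop_eq_nil_iff]; omega)]
    simp [List.drop_drop]
  · have hd : full.drop j = [] := List.drop_eq_nil_of_le (by omega)
    rw [PySem.List.pyRange_of_pos _ _ (by norm_num)]
    have : ¬ ((j:Int) < (full.length : Int)) := by exact_mod_cast hj
    simp [this, hd, pvLines]
termination_by j => full.length - j
decreasing_by omega

-- ===== VERDICT (by name: the statement is the Claim_ definition above) =====
theorem variants_to_string_py_spec : Claim_equal_variants_to_string_py := by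
  intro variants _
  unfold Spec_variants_to_string_py variants_to_string_py variants_to_string_py_alt
  by_cases h : variants = []
  · subst h; rfl
  · have hne : ¬ variants.isEmpty := by simp [List.isEmpty_iff, h]
    simp only [hne, if_false, Bool.false_eq_true]
    rw [pvA_chars variants h]
    have := pvB_lines variants 0
    simp only [List.drop_zero] at this
    simp only [PySem.List.len_eq]
    rw [show ((0:Int)) = ((0 : Nat) : Int) by norm_num, this]
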